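-- pv_equiv track=rewrite | github.com/Cell0105/Kriptografy | Prak3/Permutasi.py | permutasi_berkelompok
-- ===== SOURCE A (Python) =====
-- import itertools
--
-- def permutasi_berkelompok(grup):
--     hasil = [[]]
--     for kelompok in grup:
--         hasil_baru = []
--         for hsl in hasil:
--             for perm in itertools.permutations(kelompok):
--                 hasil_baru.append(hsl + list(perm))
--         hasil = hasil_baru
--     return hasil
-- ===== SOURCE B (Python) =====
-- import itertools
--
-- def permutasi_berkelompok(grup):
--     perms = [list(itertools.permutations(k)) for k in grup]
--     return [list(itertools.chain.from_iterable(combo))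
--             for combo in itertools.product(*perms)]
-- ===== Notes on version B (the rewrite author's own statement) =====
-- stated objective: idiomatic
-- what changed: Replaces the incremental fold that rebuilds the growing result list group by group with precomputed per-group permutation tables combined by itertools.product and flattened with chain.from_iterable.
import Mathlib
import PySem

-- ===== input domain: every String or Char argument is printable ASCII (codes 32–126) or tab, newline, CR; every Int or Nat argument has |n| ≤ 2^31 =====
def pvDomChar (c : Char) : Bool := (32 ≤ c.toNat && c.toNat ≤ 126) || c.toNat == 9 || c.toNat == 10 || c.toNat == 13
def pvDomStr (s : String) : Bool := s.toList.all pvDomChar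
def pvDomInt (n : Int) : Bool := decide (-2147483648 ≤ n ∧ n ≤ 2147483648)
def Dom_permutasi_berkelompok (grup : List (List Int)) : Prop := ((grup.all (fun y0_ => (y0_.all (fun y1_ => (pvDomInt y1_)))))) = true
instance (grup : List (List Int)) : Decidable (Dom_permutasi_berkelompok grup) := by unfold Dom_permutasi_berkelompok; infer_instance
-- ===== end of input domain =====

-- B replaces A's incremental accumulation with per-group permutation tables combined
-- by a Cartesian product and flattened (idiomatic itertools decomposition; same cost).

-- itertools.permutations, shared library primitive of both Pythons: fuel-indexed
-- transliteration of its documented order (index-lexicographic).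
def pyPermsAux : Nat → List Int → List (List Int)
  | 0, _ => [[]]
  | n + 1, xs =>
      (List.range xs.length).flatMap (fun i =>
        (pyPermsAux n (xs.eraseIdx i)).map (fun p => xs.getD i 0 :: p))

def pyPermutations (xs : List Int) : List (List Int) := pyPermsAux xs.length xs

-- ===== PORT A =====
def permutasi_berkelompok (grup : List (List Int)) : List (List Int) :=
  grup.foldl
    (fun hasil kelompok =>
      hasil.foldl
        (fun hasil_baru hsl =>
          (pyPermutations kelompok).foldl
            (fun hb perm => hb ++ [hsl ++ perm]) hasil_baru)
        [])
    [[]]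

-- ===== PORT B =====
-- itertools.product over the precomputed tables (first group varies slowest)
def pyProduct : List (List (List Int)) → List (List (List Int))
  | [] => [[]]
  | t :: ts => t.flatMap (fun x => (pyProduct ts).map (fun c => x :: c))

def permutasi_berkelompok_alt (grup : List (List Int)) : List (List Int) :=
  (pyProduct (grup.map pyPermutations)).map (fun combo => combo.flatten)

-- ===== PRECONDITION & SPEC =====
def Spec_permutasi_berkelompok (grup : List (List Int)) (out : List (List Int)) : Prop := out = permutasi_berkelompok_alt grup
instance (grup : List (List Int)) (out : List (List Int)) : Decidable (Spec_permutasi_berkelompok grup out) := by unfold Spec_permutasi_berkelompok; infer_instance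

-- ===== CLAIM (what is proved, stated in full; the proofs are below) =====
def Claim_equal_permutasi_berkelompok : Prop := ∀ (grup : List (List Int)), Dom_permutasi_berkelompok grup → Spec_permutasi_berkelompok grup (permutasi_berkelompok grup)

-- ===== LEMMAS AND PROOFS =====

theorem foldl_append_singleton (f : List Int → List Int) :
    ∀ (ps : List (List Int)) (acc : List (List Int)),
      ps.foldl (fun hb perm => hb ++ [f perm]) acc = acc ++ ps.map f := by
  intro ps
  induction ps with
  | nil => simp
  | cons p ps ih => intro acc; simp [List.foldl_cons, ih]

theorem inner_fold_eq (k : List Int) :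
    ∀ (hasil acc : List (List Int)),
      hasil.foldl
        (fun hasil_baru hsl =>
          (pyPermutations k).foldl (fun hb perm => hb ++ [hsl ++ perm]) hasil_baru)
        acc
      = acc ++ hasil.flatMap (fun hsl => (pyPermutations k).map (fun p => hsl ++ p)) := by
  intro hasil
  induction hasil with
  | nil => simp
  | cons h t ih =>
      intro acc
      simp only [List.foldl_cons, ih, foldl_append_singleton (fun p => h ++ p),
        List.flatMap_cons, List.append_assoc]

theorem main_fold_eq :
    ∀ (grup : List (List Int)) (hasil : List (List Int)),
      grup.foldl
        (fun hasil kelompok =>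
          hasil.foldl
            (fun hasil_baru hsl =>
              (pyPermutations kelompok).foldl
                (fun hb perm => hb ++ [hsl ++ perm]) hasil_baru)
            [])
        hasil
      = hasil.flatMap (fun h =>
          (pyProduct (grup.map pyPermutations)).map (fun c => h ++ c.flatten)) := by
  intro grup
  induction grup with
  | nil => intro hasil; simp [pyProduct]
  | cons k ks ih =>
      intro hasil
      rw [List.foldl_cons, inner_fold_eq, List.nil_append, ih]
      simp only [List.map_cons, pyProduct, List.flatMap_assoc, List.flatMap_map,
        List.map_flatMap, List.map_map, List.append_assoc]
      simp [Function.comp_def]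

-- ===== VERDICT (by name: the statement is the Claim_ definition above) =====
theorem permutasi_berkelompok_spec : Claim_equal_permutasi_berkelompok := by
  intro grup _
  unfold Spec_permutasi_berkelompok permutasi_berkelompok permutasi_berkelompok_alt
  rw [main_fold_eq]
  simp
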